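-- pv_equiv track=rewrite | github.com/helga20/LNU_AppliedProgrammingPython | 04/Task2.py | checkFormula
-- ===== SOURCE A (Python) =====
-- class Stack:
--     def __init__(self):
--         self.stack = []
--
--     def __str__(self):
--         return str(self.stack)
--
--     def push(self, value):
--         self.stack.append(value)
--         return self
--
--     def pop(self):
--         if self.stack:
--             return self.stack.pop()
--         else:
--             return None
--
--     def empty(self):
--         return not self.stack
--
--     def len(self):
--         return len(self.stack)
--
--     def clear(self):
--         self.stack.clear()
--
-- left_par = {'(', '[', '{'}
--
-- right_par = {')', ']', '}'}
--
-- match_par = {')': '(', ']': '[', '}': '{'}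
--
-- operands = {'x', 'y', 'z'}
--
-- operators = {'+', '-'}
--
-- def checkFormula(formula: str) -> bool:
--     stack = Stack()
--
--     for char in formula:
--         if char in left_par:
--             stack.push(char)
--         elif char in operands:
--             # позначимо операнди як F
--             stack.push('F')
--         elif char in operators:
--             stack.push(char)
--         elif char in right_par:
--             while True:
--                 # значення на вершині стеку перед закриваючою дужкою завжди має бути F (тобто операндом)
--                 rhs = stack.pop()
--                 if rhs != 'F':
--                     return False
--
--                 # наступне значення має бути або оператором, або відповідною відкриваючою дужкою
--                 # (в такому випадку останній операнд має бути повернутий в стек, а цикл зупинений)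
--                 op = stack.pop()
--                 if op == match_par[char]:
--                     stack.push('F')
--                     break
--                 elif op not in operators:
--                     return False
--
--                 # якщо останнє видобуте значення є оператором, то має бути ще один операнд
--                 lhs = stack.pop()
--                 if lhs != 'F':
--                     return False
--
--                 # якщо всі попередні кроки були успішними, надіслати результат обчислення (який також є операндом) у стек
--                 stack.push('F')
--
--     # виконувати такі кроки, як описано вище, доки стек не буде порожнім,
--     # який потрібен для перевірки того, що залишилося після обробки всіх дужок
--     while not stack.empty():
--         rhs = stack.pop()
--         if rhs != 'F':
--             return False
--         if stack.empty():
--             break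
--         op = stack.pop()
--         if op not in operators:
--             return False
--         lhs = stack.pop()
--         if lhs != 'F':
--             return False
--         stack.push('F')
--
--     return True
-- ===== SOURCE B (Python) =====
-- def checkFormula(formula: str) -> bool:
--     # One-pass state machine: tri-state cursor (START/NEED operand/AFTER operand)
--     # plus a stack holding only the open brackets. No token stack, no reductions.
--     START, NEED, AFTER = 0, 1, 2
--     match = {')': '(', ']': '[', '}': '{'}
--     state = START
--     opens = []
--     for ch in formula:
--         if ch in 'xyz':
--             if state == AFTER:
--                 return False
--             state = AFTER
--         elif ch in '+-':
--             if state != AFTER: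
--                 return False
--             state = NEED
--         elif ch in '([{':
--             if state == AFTER:
--                 return False
--             opens.append(ch)
--             state = NEED
--         elif ch in ')]}':
--             if state != AFTER or not opens or opens[-1] != match[ch]:
--                 return False
--             opens.pop()
--     return not opens and state != NEED
-- ===== Notes on version B (the rewrite author's own statement) =====
-- stated objective: simpler
-- what changed: Replaces A's token stack with F-markers and its two pop-reduce loops by a one-pass tri-state (start/need-operand/after-operand) automaton that keeps only a stack of open brackets and fails fast.
import Mathlib
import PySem

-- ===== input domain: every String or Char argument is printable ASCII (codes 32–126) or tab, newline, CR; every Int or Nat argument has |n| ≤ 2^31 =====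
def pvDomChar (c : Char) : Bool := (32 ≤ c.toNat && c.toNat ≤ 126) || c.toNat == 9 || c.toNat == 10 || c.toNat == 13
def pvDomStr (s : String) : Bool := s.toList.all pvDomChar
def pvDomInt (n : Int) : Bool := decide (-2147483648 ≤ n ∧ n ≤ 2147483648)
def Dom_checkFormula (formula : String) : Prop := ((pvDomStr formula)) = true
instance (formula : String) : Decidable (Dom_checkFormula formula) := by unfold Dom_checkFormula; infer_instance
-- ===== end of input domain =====

-- B replaces A's F-marker token stack and pop-reduce loops by a one-pass tri-state
-- automaton keeping only the open brackets (objective: simpler; same O(n) cost).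

-- ===== PORT A =====
-- Python's match_par dict (only ever queried with ')' ']' '}').
def pvMatchPar (c : Char) : Char := if c = ')' then '(' else if c = ']' then '[' else '{'

-- A's inner `while True` reduction on a right bracket; the Python list stack is
-- represented top-first (append/pop at the end become cons/head), none = `return False`.
def pvReduceA (mc : Char) : List Char → Option (List Char)
  | [] => none
  | r :: rest =>
    if r ≠ 'F' then none
    else
      match rest with
      | [] => none
      | o :: rest2 =>
        if o = mc then some ('F' :: rest2)
        else if o = '+' ∨ o = '-' then
          match rest2 with
          | [] => none
          | l :: rest3 => if l ≠ 'F' then none else pvReduceA mc ('F' :: rest3)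
        else none
  termination_by s => s.length
  decreasing_by simp

-- A's final `while not stack.empty()` loop.
def pvFinalA : List Char → Bool
  | [] => true
  | r :: rest =>
    if r ≠ 'F' then false
    else
      match rest with
      | [] => true
      | o :: rest2 =>
        if o = '+' ∨ o = '-' then
          match rest2 with
          | [] => false
          | l :: rest3 => if l ≠ 'F' then false else pvFinalA ('F' :: rest3)
        else false
  termination_by s => s.length
  decreasing_by simp

-- A's main `for char in formula` loop.
def pvGoA : List Char → List Char → Bool
  | stack, [] => pvFinalA stack
  | stack, c :: cs =>
    if c = '(' ∨ c = '[' ∨ c = '{' then pvGoA (c :: stack) cs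
    else if c = 'x' ∨ c = 'y' ∨ c = 'z' then pvGoA ('F' :: stack) cs
    else if c = '+' ∨ c = '-' then pvGoA (c :: stack) cs
    else if c = ')' ∨ c = ']' ∨ c = '}' then
      match pvReduceA (pvMatchPar c) stack with
      | none => false
      | some s => pvGoA s cs
    else pvGoA stack cs

def checkFormula (formula : String) : Bool := pvGoA [] formula.toList

-- ===== PORT B =====
-- B's state machine: st = 0 (START) / 1 (NEED operand) / 2 (AFTER operand),
-- opens = stack of open brackets (top-first).
def pvGoB : Nat → List Char → List Char → Bool
  | st, opens, [] => decide (opens = [] ∧ st ≠ 1)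
  | st, opens, c :: cs =>
    if c = 'x' ∨ c = 'y' ∨ c = 'z' then
      if st = 2 then false else pvGoB 2 opens cs
    else if c = '+' ∨ c = '-' then
      if st ≠ 2 then false else pvGoB 1 opens cs
    else if c = '(' ∨ c = '[' ∨ c = '{' then
      if st = 2 then false else pvGoB 1 (c :: opens) cs
    else if c = ')' ∨ c = ']' ∨ c = '}' then
      if st = 2 ∧ opens.head? = some (pvMatchPar c) then pvGoB 2 opens.tail cs
      else false
    else pvGoB st opens cs

def checkFormula_alt (formula : String) : Bool := pvGoB 0 [] formula.toList

-- ===== PRECONDITION & SPEC =====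
def Spec_checkFormula (formula : String) (out : Bool) : Prop := out = checkFormula_alt formula
instance (formula : String) (out : Bool) : Decidable (Spec_checkFormula formula out) := by unfold Spec_checkFormula; infer_instance

-- ===== CLAIM (what is proved, stated in full; the proofs are below) =====
def Claim_equal_checkFormula : Prop := ∀ (formula : String), Dom_checkFormula formula → Spec_checkFormula formula (checkFormula formula)

-- ===== LEMMAS AND PROOFS =====

-- "Tail shapes" of A's stack (top-first) below a topmost operand marker, indexed by
-- the list of currently open brackets (top-first): alternating (operator 'F') pairs,
-- then either nothing (top level) or an open bracket over the state at its push time.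
inductive pvTl : List Char → List Char → Prop
  | nil : pvTl [] []
  | op (o : Char) (bs t : List Char) : (o = '+' ∨ o = '-') → pvTl bs t → pvTl bs (o :: 'F' :: t)
  | br (b : Char) (bs u : List Char) : (b = '(' ∨ b = '[' ∨ b = '{') → pvTl bs u → pvTl (b :: bs) (b :: u)

-- A stack A can still turn into an accepted run: empty/NEED shape or AFTER shape.
def pvGood (s : List Char) : Prop := (∃ bs, pvTl bs s) ∨ (∃ bs t, s = 'F' :: t ∧ pvTl bs t)

-- B's state st/opens is represented by A's stack.
def pvR (st : Nat) (opens stack : List Char) : Prop :=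
  (st = 0 ∧ opens = [] ∧ stack = []) ∨
  (st = 1 ∧ pvTl opens stack ∧ stack ≠ []) ∨
  (st = 2 ∧ ∃ t, stack = 'F' :: t ∧ pvTl opens t)

theorem pvTl_head {bs : List Char} {c : Char} {t : List Char} (h : pvTl bs (c :: t)) : c ≠ 'F' := by
  cases h with
  | op o bs t ho _ => rcases ho with rfl | rfl <;> decide
  | br b bs u hb _ => rcases hb with rfl | rfl | rfl <;> decide

theorem pvGood_nil : pvGood [] := Or.inl ⟨[], pvTl.nil⟩

theorem pvGood_F {s : List Char} (h : pvGood ('F' :: s)) : ∃ bs, pvTl bs s := by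
  rcases h with ⟨bs, h⟩ | ⟨bs, t, heq, ht⟩
  · exact absurd rfl (pvTl_head h)
  · cases heq; exact ⟨bs, ht⟩

theorem pvGood_op {o : Char} {s : List Char} (ho : o = '+' ∨ o = '-')
    (h : pvGood (o :: s)) : ∃ bs t, s = 'F' :: t ∧ pvTl bs t := by
  rcases h with ⟨bs, h⟩ | ⟨bs, t, heq, ht⟩
  · cases h with
    | op o' bs t ho' ht => exact ⟨bs, t, rfl, ht⟩
    | br b bs u hb hu =>
      exfalso; rcases ho with rfl | rfl <;> rcases hb with h | h | h <;> simp_all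
  · exfalso; rcases ho with rfl | rfl <;> simp_all

theorem pvGood_br {b : Char} {s : List Char} (hb : b = '(' ∨ b = '[' ∨ b = '{')
    (h : pvGood (b :: s)) : ∃ bs, pvTl bs s := by
  rcases h with ⟨bs, h⟩ | ⟨bs, t, heq, ht⟩
  · cases h with
    | op o bs t ho ht =>
      exfalso; rcases hb with rfl | rfl | rfl <;> rcases ho with h | h <;> simp_all
    | br b' bs u hb' hu => exact ⟨bs, hu⟩
  · exfalso; rcases hb with rfl | rfl | rfl <;> simp_all

theorem pvReduce_after {mc : Char} (hmc : mc = '(' ∨ mc = '[' ∨ mc = '{') :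
    ∀ {bs t : List Char}, pvTl bs t →
      (match bs with
       | [] => pvReduceA mc ('F' :: t) = none
       | b :: bs' =>
         if b = mc then ∃ u, pvReduceA mc ('F' :: t) = some ('F' :: u) ∧ pvTl bs' u
         else pvReduceA mc ('F' :: t) = none) := by
  intro bs t h
  induction h with
  | nil =>
    show pvReduceA mc ['F'] = none
    rw [pvReduceA.eq_def]; simp
  | op o bs t ho ht ih =>
    have hom : o ≠ mc := by
      rcases ho with rfl | rfl <;> rcases hmc with rfl | rfl | rfl <;> decide
    have key : pvReduceA mc ('F' :: o :: 'F' :: t) = pvReduceA mc ('F' :: t) := by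
      rw [pvReduceA.eq_def]; simp [hom, ho]
    cases bs with
    | nil => show pvReduceA mc ('F' :: o :: 'F' :: t) = none; rw [key]; exact ih
    | cons b bs' =>
      show (if b = mc then _ else _)
      by_cases hb : b = mc
      · simp only [hb, if_pos rfl] at ih ⊢
        obtain ⟨u, hu, htl⟩ := ih
        exact ⟨u, by rw [key]; exact hu, htl⟩
      · simp only [if_neg hb] at ih ⊢
        rw [key]; exact ih
  | br b bs u hb hu ih =>
    show (if b = mc then _ else _)
    by_cases hbm : b = mc
    · subst hbm
      simp only [if_pos rfl]
      exact ⟨u, by rw [pvReduceA.eq_def]; simp, hu⟩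
    · have hop : ¬ (b = '+' ∨ b = '-') := by rcases hb with rfl | rfl | rfl <;> decide
      simp only [if_neg hbm]
      rw [pvReduceA.eq_def]; simp [hbm, hop]

theorem pvReduce_need {mc : Char} {bs s : List Char} (h : pvTl bs s) (hne : s ≠ []) :
    pvReduceA mc s = none := by
  cases h with
  | nil => exact absurd rfl hne
  | op o bs t ho ht =>
    have hoF : o ≠ 'F' := by rcases ho with rfl | rfl <;> decide
    rw [pvReduceA.eq_def]; simp [hoF]
  | br b bs u hb hu =>
    have hbF : b ≠ 'F' := by rcases hb with rfl | rfl | rfl <;> decide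
    rw [pvReduceA.eq_def]; simp [hbF]

theorem pvReduce_back {mc : Char} (hmc : mc = '(' ∨ mc = '[' ∨ mc = '{') :
    ∀ (s s' : List Char), pvReduceA mc s = some s' → pvGood s' → pvGood s := by
  have main : ∀ (n : Nat) (s s' : List Char), s.length ≤ n →
      pvReduceA mc s = some s' → pvGood s' → pvGood s := by
    intro n
    induction n with
    | zero =>
      intro s s' hl h _
      cases s with
      | nil => rw [pvReduceA.eq_def] at h; cases h
      | cons r rest => simp at hl
    | succ n IH =>
      intro s s' hl h hg
      match s with
      | [] => rw [pvReduceA.eq_def] at h; cases h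
      | r :: rest =>
        rw [pvReduceA.eq_def] at h
        by_cases hr : r = 'F'
        · subst hr
          simp only [ne_eq, not_true_eq_false, if_false] at h
          match rest with
          | [] => cases h
          | o :: rest2 =>
            by_cases hom : o = mc
            · simp only [hom, if_pos rfl] at h
              have hs' : s' = 'F' :: rest2 := by cases h; rfl
              subst hs'
              obtain ⟨bs, htl⟩ := pvGood_F hg
              exact Or.inr ⟨mc :: bs, mc :: rest2, by rw [hom],
                pvTl.br mc bs rest2 hmc htl⟩
            · by_cases hoo : o = '+' ∨ o = '-'
              · simp only [hom, if_neg, hoo, if_pos, if_true] at h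
                match rest2 with
                | [] => simp at h
                | l :: rest3 =>
                  by_cases hlF : l = 'F'
                  · subst hlF
                    simp only [ne_eq, not_true_eq_false, if_false] at h
                    have hgood : pvGood ('F' :: rest3) := by
                      refine IH ('F' :: rest3) s' ?_ h hg
                      simp at hl ⊢; omega
                    obtain ⟨bs, htl⟩ := pvGood_F hgood
                    exact Or.inr ⟨bs, o :: 'F' :: rest3, rfl,
                      pvTl.op o bs rest3 hoo htl⟩
                  · simp [hlF] at h
              · simp [hom, hoo] at h
        · simp [hr] at h
  intro s s' h hg
  exact main s.length s s' le_rfl h hg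

theorem pvFinal_after {bs t : List Char} (h : pvTl bs t) :
    pvFinalA ('F' :: t) = decide (bs = []) := by
  induction h with
  | nil => rw [pvFinalA.eq_def]; simp
  | op o bs t ho ht ih =>
    have hoF : o ≠ 'F' := by rcases ho with rfl | rfl <;> decide
    rw [pvFinalA.eq_def]; simp [ho, hoF]
    rw [ih]
  | br b bs u hb hu ih =>
    have hop : ¬ (b = '+' ∨ b = '-') := by rcases hb with rfl | rfl | rfl <;> decide
    rw [pvFinalA.eq_def]; simp [hop]

theorem pvFinal_need {bs s : List Char} (h : pvTl bs s) (hne : s ≠ []) : pvFinalA s = false := by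
  cases h with
  | nil => exact absurd rfl hne
  | op o bs t ho ht =>
    have hoF : o ≠ 'F' := by rcases ho with rfl | rfl <;> decide
    rw [pvFinalA.eq_def]; simp [hoF]
  | br b bs u hb hu =>
    have hbF : b ≠ 'F' := by rcases hb with rfl | rfl | rfl <;> decide
    rw [pvFinalA.eq_def]; simp [hbF]

theorem pvFinal_good (s : List Char) (h : pvFinalA s = true) : pvGood s := by
  have main : ∀ (n : Nat) (s : List Char), s.length ≤ n →
      pvFinalA s = true → pvGood s := by
    intro n
    induction n with
    | zero =>
      intro s hl _
      cases s with
      | nil => exact pvGood_nil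
      | cons r rest => simp at hl
    | succ n IH =>
      intro s hl h
      match s with
      | [] => exact pvGood_nil
      | r :: rest =>
        rw [pvFinalA.eq_def] at h
        by_cases hr : r = 'F'
        · subst hr
          simp only [ne_eq, not_true_eq_false, if_false] at h
          match rest with
          | [] => exact Or.inr ⟨[], [], rfl, pvTl.nil⟩
          | o :: rest2 =>
            by_cases hoo : o = '+' ∨ o = '-'
            · simp only [if_pos, hoo, if_true] at h
              match rest2 with
              | [] => cases h
              | l :: rest3 =>
                by_cases hlF : l = 'F'
                · subst hlF
                  simp only [ne_eq, not_true_eq_false, if_false] at h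
                  have hgood : pvGood ('F' :: rest3) := by
                    refine IH ('F' :: rest3) ?_ h
                    simp at hl ⊢; omega
                  obtain ⟨bs, htl⟩ := pvGood_F hgood
                  exact Or.inr ⟨bs, o :: 'F' :: rest3, rfl,
                    pvTl.op o bs rest3 hoo htl⟩
                · simp [hlF] at h
            · simp [hoo] at h
        · simp [hr] at h
  exact main s.length s le_rfl h

theorem pvBad_run : ∀ (cs s : List Char), ¬ pvGood s → pvGoA s cs = false := by
  intro cs
  induction cs with
  | nil =>
    intro s hbad
    show pvFinalA s = false
    cases hfin : pvFinalA s with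
    | false => rfl
    | true => exact absurd (pvFinal_good s hfin) hbad
  | cons c cs IH =>
    intro s hbad
    rw [pvGoA]
    by_cases hl : c = '(' ∨ c = '[' ∨ c = '{'
    · rw [if_pos hl]
      refine IH (c :: s) fun hg => hbad ?_
      obtain ⟨bs, htl⟩ := pvGood_br hl hg
      exact Or.inl ⟨bs, htl⟩
    · rw [if_neg hl]
      by_cases hx : c = 'x' ∨ c = 'y' ∨ c = 'z'
      · rw [if_pos hx]
        refine IH ('F' :: s) fun hg => hbad ?_
        obtain ⟨bs, htl⟩ := pvGood_F hg
        exact Or.inl ⟨bs, htl⟩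
      · rw [if_neg hx]
        by_cases hop : c = '+' ∨ c = '-'
        · rw [if_pos hop]
          refine IH (c :: s) fun hg => hbad ?_
          obtain ⟨bs, t, heq, htl⟩ := pvGood_op hop hg
          exact Or.inr ⟨bs, t, heq, htl⟩
        · rw [if_neg hop]
          by_cases hr : c = ')' ∨ c = ']' ∨ c = '}'
          · rw [if_pos hr]
            have hmcl : pvMatchPar c = '(' ∨ pvMatchPar c = '[' ∨ pvMatchPar c = '{' := by
              rcases hr with rfl | rfl | rfl <;> simp [pvMatchPar]
            cases hred : pvReduceA (pvMatchPar c) s with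
            | none => rfl
            | some s2 =>
              exact IH s2 fun hg => hbad (pvReduce_back hmcl s s2 hred hg)
          · rw [if_neg hr]
            exact IH s hbad

theorem pvSim : ∀ (cs : List Char) (st : Nat) (opens stack : List Char),
    pvR st opens stack → pvGoA stack cs = pvGoB st opens cs := by
  intro cs
  induction cs with
  | nil =>
    intro st opens stack hR
    rcases hR with ⟨h0, hop0, hstk⟩ | ⟨h1, htl, hne⟩ | ⟨h2, t, heq, htl⟩
    · subst h0; subst hop0; subst hstk
      show pvFinalA [] = _
      rw [pvFinalA.eq_def]; simp [pvGoB]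
    · subst h1
      show pvFinalA stack = _
      rw [pvFinal_need htl hne]; simp [pvGoB]
    · subst h2; subst heq
      show pvFinalA ('F' :: t) = _
      rw [pvFinal_after htl]; simp [pvGoB]
  | cons c cs IH =>
    intro st opens stack hR
    rw [pvGoA, pvGoB]
    by_cases hx : c = 'x' ∨ c = 'y' ∨ c = 'z'
    · have hl : ¬ (c = '(' ∨ c = '[' ∨ c = '{') := by
        rcases hx with rfl | rfl | rfl <;> decide
      rw [if_neg hl, if_pos hx, if_pos hx]
      rcases hR with ⟨h0, hop0, hstk⟩ | ⟨h1, htl, hne⟩ | ⟨h2, t, heq, htl⟩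
      · subst h0; subst hop0; subst hstk
        rw [if_neg (by decide : ¬ ((0:Nat) = 2))]
        exact IH 2 [] ['F'] (Or.inr (Or.inr ⟨rfl, [], rfl, pvTl.nil⟩))
      · subst h1
        rw [if_neg (by decide : ¬ ((1:Nat) = 2))]
        exact IH 2 opens ('F' :: stack) (Or.inr (Or.inr ⟨rfl, stack, rfl, htl⟩))
      · subst h2; subst heq
        rw [if_pos rfl]
        refine pvBad_run cs _ fun hg => ?_
        obtain ⟨bs, h'⟩ := pvGood_F hg
        exact absurd rfl (pvTl_head h')
    · by_cases hop : c = '+' ∨ c = '-'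
      · have hl : ¬ (c = '(' ∨ c = '[' ∨ c = '{') := by
          rcases hop with rfl | rfl <;> decide
        rw [if_neg hl, if_neg hx, if_pos hop, if_neg hx, if_pos hop]
        rcases hR with ⟨h0, hop0, hstk⟩ | ⟨h1, htl, hne⟩ | ⟨h2, t, heq, htl⟩
        · subst h0; subst hop0; subst hstk
          rw [if_pos (by decide : (0:Nat) ≠ 2)]
          refine pvBad_run cs _ fun hg => ?_
          obtain ⟨bs, t, heq, _⟩ := pvGood_op hop hg
          exact absurd heq (by simp)
        · subst h1
          rw [if_pos (by decide : (1:Nat) ≠ 2)]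
          refine pvBad_run cs _ fun hg => ?_
          obtain ⟨bs, t, heq, _⟩ := pvGood_op hop hg
          rw [heq] at htl
          exact absurd rfl (pvTl_head htl)
        · subst h2; subst heq
          rw [if_neg (by decide : ¬ ((2:Nat) ≠ 2))]
          exact IH 1 opens (c :: 'F' :: t)
            (Or.inr (Or.inl ⟨rfl, pvTl.op c opens t hop htl, by simp⟩))
      · by_cases hl : c = '(' ∨ c = '[' ∨ c = '{'
        · rw [if_pos hl, if_neg hx, if_neg hop, if_pos hl]
          rcases hR with ⟨h0, hop0, hstk⟩ | ⟨h1, htl, hne⟩ | ⟨h2, t, heq, htl⟩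
          · subst h0; subst hop0; subst hstk
            rw [if_neg (by decide : ¬ ((0:Nat) = 2))]
            exact IH 1 [c] [c]
              (Or.inr (Or.inl ⟨rfl, pvTl.br c [] [] hl pvTl.nil, by simp⟩))
          · subst h1
            rw [if_neg (by decide : ¬ ((1:Nat) = 2))]
            exact IH 1 (c :: opens) (c :: stack)
              (Or.inr (Or.inl ⟨rfl, pvTl.br c opens stack hl htl, by simp⟩))
          · subst h2; subst heq
            rw [if_pos rfl]
            refine pvBad_run cs _ fun hg => ?_
            obtain ⟨bs, h'⟩ := pvGood_br hl hg
            exact absurd rfl (pvTl_head h')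
        · by_cases hr : c = ')' ∨ c = ']' ∨ c = '}'
          · rw [if_neg hl, if_neg hx, if_neg hop, if_pos hr, if_neg hx, if_neg hop,
              if_neg hl, if_pos hr]
            have hmcl : pvMatchPar c = '(' ∨ pvMatchPar c = '[' ∨ pvMatchPar c = '{' := by
              rcases hr with rfl | rfl | rfl <;> simp [pvMatchPar]
            rcases hR with ⟨h0, hop0, hstk⟩ | ⟨h1, htl, hne⟩ | ⟨h2, t, heq, htl⟩
            · subst h0; subst hop0; subst hstk
              have h1 : pvReduceA (pvMatchPar c) [] = none := by rw [pvReduceA.eq_def]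
              rw [h1, if_neg (by simp)]
            · subst h1
              rw [pvReduce_need htl hne,
                if_neg (by simp : ¬ ((1:Nat) = 2 ∧ opens.head? = some (pvMatchPar c)))]
            · subst h2; subst heq
              have key := pvReduce_after hmcl htl
              cases opens with
              | nil => rw [key, if_neg (by simp)]
              | cons b obs =>
                by_cases hbm : b = pvMatchPar c
                · simp only [if_pos hbm] at key
                  obtain ⟨u, hequ, htlu⟩ := key
                  rw [hequ, if_pos ⟨rfl, by simp [hbm]⟩]
                  exact IH 2 obs ('F' :: u) (Or.inr (Or.inr ⟨rfl, u, rfl, htlu⟩))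
                · simp only [if_neg hbm] at key
                  rw [key, if_neg (by simp [hbm])]
          · rw [if_neg hl, if_neg hx, if_neg hop, if_neg hr, if_neg hx, if_neg hop,
              if_neg hl, if_neg hr]
            exact IH st opens stack hR

-- ===== VERDICT (by name: the statement is the Claim_ definition above) =====
theorem checkFormula_spec : Claim_equal_checkFormula := by
  intro formula _
  unfold Spec_checkFormula checkFormula checkFormula_alt
  exact pvSim formula.toList 0 [] [] (Or.inl ⟨rfl, rfl, rfl⟩)
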